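-- pv_equiv track=rewrite | github.com/Steelab-Tech/Law-BE | backend/src/tasks.py | filter_history_for_llm
-- ===== SOURCE A (Python) =====
-- def filter_history_for_llm(history):
--     """Filter and fix history to ensure proper user/assistant alternation."""
--     # Remove system messages from history (we'll add our own)
--     filtered = [msg for msg in history if msg.get("role") != "system"]
--
--     # Ensure alternating pattern - merge consecutive messages of same role
--     if not filtered:
--         return []
--
--     result = []
--     for msg in filtered:
--         if not result:
--             result.append(msg)
--         elif result[-1]["role"] == msg["role"]:
--             # Merge consecutive messages of same role
--             result[-1]["content"] += "\n" + msg["content"]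
--         else:
--             result.append(msg)
--
--     return result
-- ===== SOURCE B (Python) =====
-- def filter_history_for_llm(history):
--     """Filter and fix history to ensure proper user/assistant alternation.
--
--     Run-scanning rewrite: drop system messages, then walk the list once,
--     consuming each maximal run of same-role messages and joining the run's
--     contents in one assignment (mutates the run-head dicts in place, as the
--     original does).
--     """
--     filtered = [m for m in history if m.get("role") != "system"]
--     result = []
--     i = 0
--     n = len(filtered)
--     while i < n:
--         head = filtered[i]
--         role = head.get("role")
--         j = i + 1
--         parts = []
--         while j < n and filtered[j].get("role") == role:
--             parts.append(filtered[j]["content"])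
--             j += 1
--         if parts:
--             head["content"] = "\n".join([head["content"]] + parts)
--         result.append(head)
--         i = j
--     return result
-- ===== Notes on version B (the rewrite author's own statement) =====
-- stated objective: alternative
-- what changed: Replaces A's lookback accumulator (append-or-merge into result[-1] per message) with a run-scanning loop that consumes each maximal run of same-role messages and joins the run's contents with a single '\n'.join per run.
import Mathlib
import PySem

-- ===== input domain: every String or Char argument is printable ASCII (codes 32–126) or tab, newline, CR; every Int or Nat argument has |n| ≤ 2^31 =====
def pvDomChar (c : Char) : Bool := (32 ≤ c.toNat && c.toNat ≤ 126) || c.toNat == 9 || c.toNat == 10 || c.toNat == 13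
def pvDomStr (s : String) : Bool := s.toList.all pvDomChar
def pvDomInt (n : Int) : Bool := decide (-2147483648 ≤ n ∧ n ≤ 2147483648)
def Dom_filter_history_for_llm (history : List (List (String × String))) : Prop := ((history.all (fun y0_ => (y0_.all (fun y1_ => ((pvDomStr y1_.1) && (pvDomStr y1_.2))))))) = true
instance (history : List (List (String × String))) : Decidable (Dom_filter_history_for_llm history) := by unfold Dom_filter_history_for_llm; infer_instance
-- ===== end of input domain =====

-- B replaces A's lookback accumulator (merge into result[-1]) with a run-scanning loop joining each
-- maximal same-role run in one step; both A and B mutate the caller's message dicts in place — the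
-- equivalence proved here is about the RETURN value.

-- shared dict primitives (msg.get/["…"] reads and the item assignment, Python-exact via PySem.Dict)
def pvGetRole (m : List (String × String)) : Option String := (PySem.Dict.mk m).get? "role"
def pvContent (m : List (String × String)) : String := ((PySem.Dict.mk m).get? "content").getD ""
def pvSetContent (m : List (String × String)) (v : String) : List (String × String) :=
  ((PySem.Dict.mk m).insert "content" v).items
def pvKeep (m : List (String × String)) : Bool := pvGetRole m != some "system"

-- ===== PORT A =====
-- result.append(msg) / merge "content" of result[-1]; branches in A's order
def aStep (result : List (List (String × String))) (msg : List (String × String)) :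
    List (List (String × String)) :=
  match result.getLast? with
  | none => result ++ [msg]
  | some last =>
    if pvGetRole last = pvGetRole msg then
      result.dropLast ++ [pvSetContent last (pvContent last ++ "\n" ++ pvContent msg)]
    else
      result ++ [msg]

def filter_history_for_llm (history : List (List (String × String))) : List (List (String × String)) :=
  let filtered := history.filter pvKeep
  if filtered = [] then []
  else filtered.foldl aStep []

-- ===== PORT B =====
-- inner while: collect the contents of the run continuing `role`, return them with the rest
def takeRun (role : Option String) : List (List (String × String)) →
    List String × List (List (String × String))
  | [] => ([], [])
  | m :: tl =>
    if pvGetRole m = role then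
      let pr := takeRun role tl
      (pvContent m :: pr.1, pr.2)
    else ([], m :: tl)

theorem takeRun_rest_le (role : Option String) (l : List (List (String × String))) :
    (takeRun role l).2.length ≤ l.length := by
  induction l with
  | nil => simp [takeRun]
  | cons m tl ih =>
    simp only [takeRun]
    split
    · simpa using Nat.le_succ_of_le ih
    · simp

-- outer while over the remaining filtered messages
def bLoop : List (List (String × String)) → List (List (String × String))
  | [] => []
  | head :: tl =>
    let pr := takeRun (pvGetRole head) tl
    (if pr.1 ≠ [] then pvSetContent head (PySem.Str.join "\n" (pvContent head :: pr.1)) else head)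
      :: bLoop pr.2
termination_by l => l.length
decreasing_by
  have := takeRun_rest_le (pvGetRole head) tl
  simpa using Nat.lt_succ_of_le this

def filter_history_for_llm_alt (history : List (List (String × String))) :
    List (List (String × String)) :=
  bLoop (history.filter pvKeep)

-- ===== PRECONDITION & SPEC =====
-- Pre_ excludes exactly the inputs on which Python A raises KeyError: two or more kept messages
-- one of which lacks a "role" key, or an adjacent same-role pair of kept messages one of which
-- lacks "content".
def Pre_filter_history_for_llm (history : List (List (String × String))) : Prop :=
  (2 ≤ (history.filter pvKeep).length → ∀ m ∈ history.filter pvKeep, (pvGetRole m).isSome) ∧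
  (∀ p ∈ (history.filter pvKeep).zip (history.filter pvKeep).tail,
    pvGetRole p.1 = pvGetRole p.2 →
      ((PySem.Dict.mk p.1).get? "content").isSome ∧ ((PySem.Dict.mk p.2).get? "content").isSome)
instance (history : List (List (String × String))) : Decidable (Pre_filter_history_for_llm history) := by
  unfold Pre_filter_history_for_llm; infer_instance

def pvWitness_filter_history_for_llm : (List (List (String × String))) :=
  [[("role", "user"), ("content", "hi")],
   [("role", "user"), ("content", "again")],
   [("role", "system"), ("content", "ignored")],
   [("role", "assistant"), ("content", "yo")]]

def Spec_filter_history_for_llm (history : List (List (String × String))) (out : List (List (String × String))) : Prop := out = filter_history_for_llm_alt history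
instance (history : List (List (String × String))) (out : List (List (String × String))) : Decidable (Spec_filter_history_for_llm history out) := by unfold Spec_filter_history_for_llm; infer_instance

-- ===== CLAIM (what is proved, stated in full; the proofs are below) =====
def Claim_equal_filter_history_for_llm : Prop := ∀ (history : List (List (String × String))), Dom_filter_history_for_llm history → Pre_filter_history_for_llm history → Spec_filter_history_for_llm history (filter_history_for_llm history)

-- ===== LEMMAS AND PROOFS =====

theorem aStep_ne_nil (s : List (List (String × String))) (m : List (String × String)) :
    aStep s m ≠ [] := by
  unfold aStep
  cases h : s.getLast? <;> simp
  split <;> simp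

theorem aStep_append (r s : List (List (String × String))) (m : List (String × String))
    (hs : s ≠ []) : aStep (r ++ s) m = r ++ aStep s m := by
  unfold aStep
  rw [List.getLast?_append_of_ne_nil r hs]
  cases h : s.getLast? with
  | none => simp [List.getLast?_eq_none_iff.mp h] at hs
  | some last =>
    split
    · rw [List.append_assoc]
    · split_ifs with hr
      · rw [List.dropLast_append_of_ne_nil hs, List.append_assoc]
      · rw [List.append_assoc]

theorem foldl_aStep_shift (l : List (List (String × String)))
    (r s : List (List (String × String))) (hs : s ≠ []) :
    List.foldl aStep (r ++ s) l = r ++ List.foldl aStep s l := by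
  induction l generalizing s with
  | nil => simp
  | cons m tl ih =>
    simp only [List.foldl_cons]
    rw [aStep_append r s m hs, ih (aStep s m) (aStep_ne_nil s m)]

theorem pvGetRole_set (m : List (String × String)) (v : String) :
    pvGetRole (pvSetContent m v) = pvGetRole m := by
  unfold pvGetRole pvSetContent
  have : PySem.Dict.mk ((PySem.Dict.mk m).insert "content" v).items
      = (PySem.Dict.mk m).insert "content" v := rfl
  rw [this]
  exact PySem.Dict.get?_insert_of_ne _ _ (by decide)

theorem pvContent_set (m : List (String × String)) (v : String) :
    pvContent (pvSetContent m v) = v := by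
  unfold pvContent pvSetContent
  have : PySem.Dict.mk ((PySem.Dict.mk m).insert "content" v).items
      = (PySem.Dict.mk m).insert "content" v := rfl
  rw [this, PySem.Dict.get?_insert_self]
  rfl

theorem pvSetContent_set (m : List (String × String)) (v w : String) :
    pvSetContent (pvSetContent m v) w = pvSetContent m w := by
  unfold pvSetContent
  have : PySem.Dict.mk ((PySem.Dict.mk m).insert "content" v).items
      = (PySem.Dict.mk m).insert "content" v := rfl
  rw [this, PySem.Dict.insert_insert_self]

theorem join_pair (a b : String) : PySem.Str.join "\n" [a, b] = a ++ "\n" ++ b := by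
  apply String.toList_inj.mp
  rw [PySem.Str.toList_join]
  simp only [List.map_cons, List.map_nil]
  rw [PySem.Chars.join_cons_cons, PySem.Chars.join_singleton]
  simp

theorem join_merge (a b : String) (l : List String) :
    PySem.Str.join "\n" ((a ++ "\n" ++ b) :: l) = PySem.Str.join "\n" (a :: b :: l) := by
  apply String.toList_inj.mp
  rw [PySem.Str.toList_join, PySem.Str.toList_join]
  cases l with
  | nil =>
    simp only [List.map_cons, List.map_nil]
    rw [PySem.Chars.join_singleton, PySem.Chars.join_cons_cons, PySem.Chars.join_singleton]
    simp
  | cons c tl =>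
    simp only [List.map_cons]
    rw [PySem.Chars.join_cons_cons, PySem.Chars.join_cons_cons, PySem.Chars.join_cons_cons]
    simp [List.append_assoc]

theorem foldl_aStep_single (l : List (List (String × String))) (x : List (String × String)) :
    List.foldl aStep [x] l =
      (if (takeRun (pvGetRole x) l).1 ≠ [] then
          pvSetContent x (PySem.Str.join "\n" (pvContent x :: (takeRun (pvGetRole x) l).1))
        else x) :: bLoop (takeRun (pvGetRole x) l).2 := by
  induction l generalizing x with
  | nil => simp [takeRun, bLoop]
  | cons m tl ih =>
    by_cases h : pvGetRole m = pvGetRole x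
    · have hstep : aStep [x] m
          = [pvSetContent x (pvContent x ++ "\n" ++ pvContent m)] := by
        unfold aStep
        simp [h]
      simp only [List.foldl_cons, hstep]
      rw [ih]
      rw [pvGetRole_set]
      simp only [takeRun, if_pos h]
      by_cases hps : (takeRun (pvGetRole x) tl).1 = []
      · rw [if_neg (by simp [hps]), if_pos (by simp)]
        rw [hps, join_pair]
      · rw [if_pos (by simp [hps]), if_pos (by simp)]
        rw [pvContent_set, pvSetContent_set, join_merge]
    · have hstep : aStep [x] m = [x] ++ [m] := by
        unfold aStep
        simp [Ne.symm h]
      simp only [List.foldl_cons, hstep]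
      rw [foldl_aStep_shift tl [x] [m] (by simp), ih]
      simp only [takeRun, if_neg h]
      simp only [ne_eq, not_true_eq_false]
      simp only [bLoop]
      simp

theorem foldl_aStep_eq_bLoop (l : List (List (String × String))) :
    List.foldl aStep [] l = bLoop l := by
  cases l with
  | nil => simp [bLoop]
  | cons h tl =>
    have h0 : aStep [] h = [h] := by unfold aStep; simp
    simp only [List.foldl_cons, h0]
    rw [foldl_aStep_single]
    simp [bLoop]

-- ===== VERDICT (by name: the statement is the Claim_ definition above) =====
theorem filter_history_for_llm_spec : Claim_equal_filter_history_for_llm := by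
  intro history _ _
  unfold Spec_filter_history_for_llm filter_history_for_llm filter_history_for_llm_alt
  by_cases h : history.filter pvKeep = []
  · simp [h, bLoop]
  · simp only [if_neg h]
    exact foldl_aStep_eq_bLoop _
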